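-- pv_equiv track=rewrite | github.com/DarrenZal/yonearth-gaia-chatbot | scripts/archive/research/analyze_entity_pairs.py | get_entity_pairs
-- ===== SOURCE A (Python) =====
-- def normalize_entity(entity):
--     """Normalize entity name for comparison"""
--     return entity.lower().strip()
--
-- def get_entity_pairs(relationships):
--     """Extract (source, target) pairs from relationships"""
--     pairs = {}
--     for r in relationships:
--         key = (normalize_entity(r['source']), normalize_entity(r['target']))
--         if key not in pairs:
--             pairs[key] = []
--         pairs[key].append(r)
--     return pairs
-- ===== SOURCE B (Python) =====
-- def get_entity_pairs(relationships):
--     """Extract (source, target) pairs from relationships"""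
--     def key(r):
--         return (r['source'].lower().strip(), r['target'].lower().strip())
--     keys = list(dict.fromkeys(map(key, relationships)))
--     return {k: [r for r in relationships if key(r) == k] for k in keys}
-- ===== Notes on version B (the rewrite author's own statement) =====
-- stated objective: alternative
-- what changed: Instead of one pass mutating a dict of growing lists, B first computes the deduplicated key list (dict.fromkeys, first-occurrence order) and then builds each group by filtering the whole input per key; same result, different decomposition (two-phase nested scan vs single-pass accumulation).
import Mathlib
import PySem

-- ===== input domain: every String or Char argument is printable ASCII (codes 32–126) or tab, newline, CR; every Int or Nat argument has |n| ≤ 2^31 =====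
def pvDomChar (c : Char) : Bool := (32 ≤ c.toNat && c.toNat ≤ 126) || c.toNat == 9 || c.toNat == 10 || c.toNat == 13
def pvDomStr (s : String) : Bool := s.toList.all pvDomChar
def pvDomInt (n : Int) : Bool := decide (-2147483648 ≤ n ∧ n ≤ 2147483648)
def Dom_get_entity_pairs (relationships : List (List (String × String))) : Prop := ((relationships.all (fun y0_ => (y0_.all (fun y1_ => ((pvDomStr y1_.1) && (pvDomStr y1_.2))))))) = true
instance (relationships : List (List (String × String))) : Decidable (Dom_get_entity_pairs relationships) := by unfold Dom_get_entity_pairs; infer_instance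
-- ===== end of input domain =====

-- B replaces A's single-pass dict accumulation by a two-phase dedup-keys-then-filter decomposition (alternative, same results).


-- ===== PORT A =====
-- normalize_entity: entity.lower().strip()
def normalize_entity (entity : String) : String := PySem.Str.strip (PySem.Str.lower entity)

-- r['k'] (total form; Pre_ guarantees the key is present, so the default is never read)
def pvLookup (r : List (String × String)) (k : String) : String := (PySem.Dict.mk r).getD k ""

def get_entity_pairs (relationships : List (List (String × String))) : List (String × String × List (List (String × String))) :=
  let pairs := relationships.foldl
    (fun (pairs : PySem.Dict (String × String) (List (List (String × String)))) r =>
      let key := (normalize_entity (pvLookup r "source"), normalize_entity (pvLookup r "target"))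
      let pairs := if pairs.contains key then pairs else pairs.insert key []
      pairs.modify key [] (· ++ [r]))
    PySem.Dict.empty
  pairs.items.map (fun p => (p.1.1, p.1.2, p.2))

-- ===== PORT B =====
def pvKeyB (r : List (String × String)) : String × String :=
  (PySem.Str.strip (PySem.Str.lower (pvLookup r "source")),
   PySem.Str.strip (PySem.Str.lower (pvLookup r "target")))

def get_entity_pairs_alt (relationships : List (List (String × String))) : List (String × String × List (List (String × String))) :=
  let keys := PySem.List.dedup (relationships.map pvKeyB)
  keys.map (fun k => (k.1, k.2, relationships.filter (fun r => pvKeyB r == k)))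

-- ===== PRECONDITION & SPEC =====
-- Pre_ excludes exactly the inputs where some relationship lacks a 'source' or 'target' key (Python A raises KeyError there).
def Pre_get_entity_pairs (relationships : List (List (String × String))) : Prop :=
  ∀ r ∈ relationships, "source" ∈ r.map Prod.fst ∧ "target" ∈ r.map Prod.fst
instance (relationships : List (List (String × String))) : Decidable (Pre_get_entity_pairs relationships) := by unfold Pre_get_entity_pairs; infer_instance
def pvWitness_get_entity_pairs : (List (List (String × String))) :=
  [[("source", " Foo "), ("target", "Bar")], [("source", "foo"), ("target", "bar")], [("source", "X"), ("target", "Bar")]]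

def Spec_get_entity_pairs (relationships : List (List (String × String))) (out : List (String × String × List (List (String × String)))) : Prop := out = get_entity_pairs_alt relationships
instance (relationships : List (List (String × String))) (out : List (String × String × List (List (String × String)))) : Decidable (Spec_get_entity_pairs relationships out) := by unfold Spec_get_entity_pairs; infer_instance

-- ===== CLAIM (what is proved, stated in full; the proofs are below) =====
def Claim_equal_get_entity_pairs : Prop := ∀ (relationships : List (List (String × String))), Dom_get_entity_pairs relationships → Pre_get_entity_pairs relationships → Spec_get_entity_pairs relationships (get_entity_pairs relationships)

-- ===== LEMMAS AND PROOFS =====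

-- A's loop step ('if absent insert []; then append') is dict.modify with default [].
theorem stepA_eq_modify (d : PySem.Dict (String × String) (List (List (String × String))))
    (k : String × String) (r : List (String × String)) :
    (if d.contains k then d else d.insert k []).modify k [] (· ++ [r]) = d.modify k [] (· ++ [r]) := by
  cases h : d.contains k
  · simp only [Bool.false_eq_true, if_false, PySem.Dict.modify,
      PySem.Dict.getD_insert_self, PySem.Dict.insert_insert_self]
    rw [PySem.Dict.getD_of_not_contains d [] h]
  · simp

-- A's accumulation loop, rewritten as a fold of dict.modify over (key, relationship) pairs.
theorem foldA_eq (rels : List (List (String × String))) :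
    rels.foldl
      (fun (pairs : PySem.Dict (String × String) (List (List (String × String)))) r =>
        let key := (normalize_entity (pvLookup r "source"), normalize_entity (pvLookup r "target"))
        let pairs := if pairs.contains key then pairs else pairs.insert key []
        pairs.modify key [] (· ++ [r]))
      PySem.Dict.empty
    = (rels.map (fun r => (pvKeyB r, r))).foldl
        (fun d p => d.modify p.1 [] (· ++ [p.2])) PySem.Dict.empty := by
  rw [List.foldl_map]
  have h : (fun (pairs : PySem.Dict (String × String) (List (List (String × String)))) r =>
        let key := (normalize_entity (pvLookup r "source"), normalize_entity (pvLookup r "target"))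
        let pairs := if pairs.contains key then pairs else pairs.insert key []
        pairs.modify key [] (· ++ [r]))
      = (fun d r => PySem.Dict.modify d (pvKeyB r) [] (· ++ [r])) := by
    funext d r
    exact stepA_eq_modify d (pvKeyB r) r
  rw [h]

theorem get_entity_pairs_spec : Claim_equal_get_entity_pairs := by
  intro rels _ _
  unfold Spec_get_entity_pairs get_entity_pairs get_entity_pairs_alt
  dsimp only
  rw [foldA_eq]
  set l := rels.map (fun r => (pvKeyB r, r)) with hl
  set D := l.foldl (fun d p => d.modify p.1 [] (· ++ [p.2])) PySem.Dict.empty with hD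
  have hnd : D.keys.Nodup := by
    rw [hD, hl, List.foldl_map]
    exact PySem.Dict.nodup_keys_foldl_modify_key rels pvKeyB [] (fun _ r => (· ++ [r])) _
      PySem.Dict.nodup_keys_empty
  have hkeys : D.keys = PySem.List.dedup (rels.map pvKeyB) := by
    rw [hD, hl, List.foldl_map]
    rw [PySem.Dict.keys_foldl_modify_key]
    simp [PySem.Set.update_nil_left, PySem.Dict.keys_empty]
  have hget : ∀ k, D.getD k [] = rels.filter (fun r => pvKeyB r == k) := by
    intro k
    rw [hD]
    rw [PySem.Dict.getD_foldl_modify_append]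
    rw [hl, List.filter_map, List.map_map]
    simp [PySem.Dict.getD_empty, Function.comp_def]
  rw [PySem.Dict.items_eq_map_keys D hnd [], hkeys, List.map_map]
  apply List.map_congr_left
  intro k _
  simp [hget k]
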